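-- pv_equiv track=rewrite | github.com/pypi-data/pypi-mirror-361 | packages/gway/gway-0.4.41.tar.gz/gway-0.4.41/projects/release.py | _extract_todos
-- ===== SOURCE A (Python) =====
-- def _extract_todos(source):
--     todos = []
--     lines = source.splitlines()
--     current = []
--     for line in lines:
--         stripped = line.strip()
--         if "# TODO" in stripped:
--             if current:
--                 todos.append("\n".join(current))
--             current = [stripped]
--         elif current and (stripped.startswith("#") or not stripped):
--             current.append(stripped)
--         elif current:
--             todos.append("\n".join(current))
--             current = []
--     if current:
--         todos.append("\n".join(current))
--     return todos
-- ===== SOURCE B (Python) =====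
-- def _extract_todos(source):
--     stripped = [l.strip() for l in source.splitlines()]
--     todos = []
--     i = 0
--     n = len(stripped)
--     while i < n:
--         s = stripped[i]
--         if "# TODO" in s:
--             block = [s]
--             i += 1
--             while i < n and "# TODO" not in stripped[i] and (stripped[i].startswith("#") or not stripped[i]):
--                 block.append(stripped[i])
--                 i += 1
--             todos.append("\n".join(block))
--         else:
--             i += 1
--     return todos
-- ===== Notes on version B (the rewrite author's own statement) =====
-- stated objective: alternative
-- what changed: Replaces the one-pass flush/accumulator state machine with an outer scan that finds each TODO-marker line and an inner consume loop that gathers the following comment/blank lines into the block.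
import Mathlib
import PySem

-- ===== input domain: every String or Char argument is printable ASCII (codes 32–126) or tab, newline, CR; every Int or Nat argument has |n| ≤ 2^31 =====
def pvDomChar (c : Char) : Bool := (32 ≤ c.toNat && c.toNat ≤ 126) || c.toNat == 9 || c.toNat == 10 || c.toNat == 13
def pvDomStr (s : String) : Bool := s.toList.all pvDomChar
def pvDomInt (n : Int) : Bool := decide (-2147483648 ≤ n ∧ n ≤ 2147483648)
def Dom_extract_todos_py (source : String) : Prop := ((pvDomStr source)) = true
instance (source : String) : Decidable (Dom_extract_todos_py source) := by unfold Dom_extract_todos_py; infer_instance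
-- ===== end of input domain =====

-- B replaces A's one-pass flush/accumulator state machine by an outer TODO search with an
-- inner consume loop per block (objective: alternative decomposition; same cost).

-- ===== PORT A =====
-- literal port of A: fold over the lines carrying (todos, current), then a final flush
def extract_todos_py (source : String) : List String :=
  let lines := PySem.Str.splitlines source
  let st := lines.foldl (fun (st : List String × List String) line =>
    let todos := st.1
    let current := st.2
    let stripped := PySem.Str.strip line
    if PySem.Str.isIn "# TODO" stripped then
      (if current ≠ [] then todos ++ [PySem.Str.join "\n" current] else todos, [stripped])
    else if current ≠ [] ∧ (PySem.Str.startswith stripped "#" = true ∨ stripped = "") then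
      (todos, current ++ [stripped])
    else if current ≠ [] then
      (todos ++ [PySem.Str.join "\n" current], [])
    else (todos, current)) ([], [])
  if st.2 ≠ [] then st.1 ++ [PySem.Str.join "\n" st.2] else st.1

-- ===== PORT B =====
-- inner while of Source B: consume the comment/blank continuation lines of a block,
-- returning (block tail, remaining lines)
def pvConsume : List String → List String × List String
  | [] => ([], [])
  | l :: ls =>
    if ¬ PySem.Str.isIn "# TODO" l ∧ (PySem.Str.startswith l "#" = true ∨ l = "") then
      let p := pvConsume ls
      (l :: p.1, p.2)
    else ([], l :: ls)

theorem pvConsume_len : ∀ ls : List String, (pvConsume ls).2.length ≤ ls.length := by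
  intro ls
  induction ls with
  | nil => simp [pvConsume]
  | cons l ls ih =>
    simp only [pvConsume]
    split
    · exact Nat.le_succ_of_le ih
    · simp

-- outer while of Source B over the pre-stripped lines
def pvScan : List String → List String
  | [] => []
  | l :: ls =>
    if PySem.Str.isIn "# TODO" l then
      let p := pvConsume ls
      PySem.Str.join "\n" (l :: p.1) :: pvScan p.2
    else pvScan ls
termination_by ls => ls.length
decreasing_by
  · exact Nat.lt_succ_of_le (pvConsume_len ls)
  · simp

def extract_todos_py_alt (source : String) : List String :=
  pvScan ((PySem.Str.splitlines source).map PySem.Str.strip)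

-- ===== PRECONDITION & SPEC =====
def Spec_extract_todos_py (source : String) (out : List String) : Prop := out = extract_todos_py_alt source
instance (source : String) (out : List String) : Decidable (Spec_extract_todos_py source out) := by unfold Spec_extract_todos_py; infer_instance

-- ===== CLAIM (what is proved, stated in full; the proofs are below) =====
def Claim_equal_extract_todos_py : Prop := ∀ (source : String), Dom_extract_todos_py source → Spec_extract_todos_py source (extract_todos_py source)

-- ===== LEMMAS AND PROOFS =====

-- A's loop body, on an already-stripped line
def pvStepA (st : List String × List String) (stripped : String) : List String × List String :=
  if PySem.Str.isIn "# TODO" stripped then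
    (if st.2 ≠ [] then st.1 ++ [PySem.Str.join "\n" st.2] else st.1, [stripped])
  else if st.2 ≠ [] ∧ (PySem.Str.startswith stripped "#" = true ∨ stripped = "") then
    (st.1, st.2 ++ [stripped])
  else if st.2 ≠ [] then
    (st.1 ++ [PySem.Str.join "\n" st.2], [])
  else st

def pvFlush (st : List String × List String) : List String :=
  if st.2 ≠ [] then st.1 ++ [PySem.Str.join "\n" st.2] else st.1

-- joint invariant of A's fold against B's scan/consume
theorem pv_main : ∀ ls : List String,
    (∀ todos : List String, pvFlush (ls.foldl pvStepA (todos, [])) = todos ++ pvScan ls) ∧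
    (∀ todos cur : List String, cur ≠ [] →
      pvFlush (ls.foldl pvStepA (todos, cur)) =
        todos ++ PySem.Str.join "\n" (cur ++ (pvConsume ls).1) :: pvScan (pvConsume ls).2) := by
  intro ls
  induction ls with
  | nil =>
    constructor
    · intro todos; simp [pvFlush, pvScan]
    · intro todos cur h; simp [pvFlush, pvConsume, pvScan, h]
  | cons l ls ih =>
    have key : ∀ todos cur : List String,
        pvFlush ((l :: ls).foldl pvStepA (todos, cur)) =
          pvFlush (ls.foldl pvStepA (pvStepA (todos, cur) l)) := by
      intro todos cur; rw [List.foldl_cons]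
    constructor
    · intro todos
      rw [key]
      by_cases ht : PySem.Chars.isIn ['#', ' ', 'T', 'O', 'D', 'O'] l.toList = true
      · have hstep : pvStepA (todos, []) l = (todos, [l]) := by
          simp [pvStepA, ht]
        rw [hstep, ih.2 todos [l] (by simp)]
        simp [pvScan, ht]
      · have hstep : pvStepA (todos, []) l = (todos, []) := by
          simp [pvStepA, ht]
        rw [hstep, ih.1 todos]
        simp [pvScan, ht]
    · intro todos cur hcur
      rw [key]
      by_cases ht : PySem.Chars.isIn ['#', ' ', 'T', 'O', 'D', 'O'] l.toList = true
      · have hstep : pvStepA (todos, cur) l = (todos ++ [PySem.Str.join "\n" cur], [l]) := by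
          simp [pvStepA, ht, hcur]
        rw [hstep, ih.2 _ [l] (by simp)]
        simp [pvScan, pvConsume, ht, List.append_assoc]
      · by_cases hc : PySem.Chars.startswith l.toList ['#'] = true ∨ l = ""
        · have hstep : pvStepA (todos, cur) l = (todos, cur ++ [l]) := by
            simp [pvStepA, ht, hcur, hc]
          rw [hstep, ih.2 _ _ (by simp)]
          simp [pvConsume, ht, hc, List.append_assoc]
        · have hstep : pvStepA (todos, cur) l = (todos ++ [PySem.Str.join "\n" cur], []) := by
            simp [pvStepA, ht, hcur, hc]
          rw [hstep, ih.1 _]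
          simp [pvConsume, pvScan, ht, hc, List.append_assoc]

-- ===== VERDICT (by name: the statement is the Claim_ definition above) =====
theorem extract_todos_py_spec : Claim_equal_extract_todos_py := by
  intro source _
  unfold Spec_extract_todos_py extract_todos_py extract_todos_py_alt
  show pvFlush (((PySem.Str.splitlines source).foldl
      (fun st line => pvStepA st (PySem.Str.strip line)) ([], []))) = _
  rw [← List.foldl_map]
  rw [(pv_main ((PySem.Str.splitlines source).map PySem.Str.strip)).1 []]
  simp
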